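-- pv_equiv track=rewrite | github.com/M-H-Amini/NLP | MHPoet.py | preprocessWords
-- ===== SOURCE A (Python) =====
-- def preprocessWords(unique_words):
--     bad_words = []
--     for word in unique_words:
--         if len(word)==1:
--             bad_words.append(word)
--     for word in bad_words:
--         unique_words.remove(word)
--     return unique_words
-- ===== SOURCE B (Python) =====
-- def preprocessWords(unique_words):
--     j = 0
--     for i in range(len(unique_words)):
--         if len(unique_words[i]) != 1:
--             unique_words[j] = unique_words[i]
--             j += 1
--     del unique_words[j:]
--     return unique_words
-- ===== Notes on version B (the rewrite author's own statement) =====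
-- stated objective: faster
-- what changed: Replaces the collect-bad-words pass plus a repeated list.remove scan for each bad word with a single in-place two-pointer compaction (write index + truncation), keeping the same in-place mutation and returned object.
import Mathlib
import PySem

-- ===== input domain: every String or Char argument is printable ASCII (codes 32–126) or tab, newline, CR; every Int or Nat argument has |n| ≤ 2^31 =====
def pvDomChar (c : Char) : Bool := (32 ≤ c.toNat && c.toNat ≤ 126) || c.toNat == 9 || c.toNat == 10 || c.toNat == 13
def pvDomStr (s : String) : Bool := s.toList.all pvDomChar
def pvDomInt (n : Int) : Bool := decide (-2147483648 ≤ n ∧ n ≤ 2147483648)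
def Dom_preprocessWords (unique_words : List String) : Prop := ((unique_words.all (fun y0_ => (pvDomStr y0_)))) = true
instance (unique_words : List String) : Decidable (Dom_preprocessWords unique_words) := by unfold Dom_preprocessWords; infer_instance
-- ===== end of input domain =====

-- B replaces A's collect-then-repeated-remove (quadratic) with one in-place two-pointer
-- compaction pass; both mutate the argument list in place in Python, equivalence proved
-- about the returned value (which is the same mutated object in both).

-- ===== PORT A =====
-- first loop: bad_words collects the single-character words;
-- second loop: unique_words.remove(word) for each — remove never raises here, since every
-- collected occurrence is still present when removed (one copy per occurrence), so the
-- `.getD acc` default branch of remove? is unreachable.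
def preprocessWords (unique_words : List String) : List String :=
  let bad_words := unique_words.foldl
    (fun acc word => if PySem.Str.len word == 1 then acc ++ [word] else acc) []
  bad_words.foldl
    (fun acc word => (PySem.List.remove? acc word).getD acc) unique_words

-- ===== PORT B =====
-- j = 0; for i in range(len(u)): if len(u[i]) != 1: u[j] = u[i]; j += 1; del u[j:]; return u
def preprocessWords_alt (unique_words : List String) : List String :=
  let st := (PySem.List.pyRange 0 (unique_words.length : Int)).foldl
    (fun (st : List String × Nat) i =>
      match PySem.List.pyGet? st.1 i with
      | some w => if PySem.Str.len w ≠ 1 then (st.1.set st.2 w, st.2 + 1) else st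
      | none => st)
    (unique_words, 0)
  st.1.take st.2

-- ===== PRECONDITION & SPEC =====
def Spec_preprocessWords (unique_words : List String) (out : List String) : Prop := out = preprocessWords_alt unique_words
instance (unique_words : List String) (out : List String) : Decidable (Spec_preprocessWords unique_words out) := by unfold Spec_preprocessWords; infer_instance

-- ===== CLAIM (what is proved, stated in full; the proofs are below) =====
def Claim_equal_preprocessWords : Prop := ∀ (unique_words : List String), Dom_preprocessWords unique_words → Spec_preprocessWords unique_words (preprocessWords unique_words)

-- ===== LEMMAS AND PROOFS =====

theorem pv_len_ne (w : String) (h : ¬ (PySem.Str.len w == 1) = true) : ¬ w.length = 1 := by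
  simp [PySem.Str.len_eq] at h; simpa using h

theorem pv_len_eq (w : String) (h : (PySem.Str.len w == 1) = true) : w.length = 1 := by
  simp [PySem.Str.len_eq] at h; simpa using h

-- removing a chain of words that all have length 1 from h :: t, where h does not, keeps h in front
theorem pv_remAll_skip (bs : List String) (h : String) (t : List String)
    (hbs : ∀ b ∈ bs, PySem.Str.len b == 1) (hh : ¬ (PySem.Str.len h == 1)) :
    bs.foldl (fun acc word => (PySem.List.remove? acc word).getD acc) (h :: t)
      = h :: bs.foldl (fun acc word => (PySem.List.remove? acc word).getD acc) t := by
  induction bs generalizing t with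
  | nil => rfl
  | cons b bs ih =>
    have hne : h ≠ b := by
      intro he; exact hh (he ▸ hbs b (by simp))
    simp only [List.foldl_cons, PySem.List.remove?_cons_of_ne t hne]
    cases hr : PySem.List.remove? t b with
    | none => simpa [hr] using ih _ (fun x hx => hbs x (by simp [hx]))
    | some l => simpa [hr] using ih _ (fun x hx => hbs x (by simp [hx]))

-- A's removal loop, run on exactly the single-character words of u, keeps the rest
theorem pv_remAll_filter (u : List String) :
    (u.filter (fun w => PySem.Str.len w == 1)).foldl
        (fun acc word => (PySem.List.remove? acc word).getD acc) u
      = u.filter (fun w => !(PySem.Str.len w == 1)) := by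
  induction u with
  | nil => rfl
  | cons h t ih =>
    by_cases hp : PySem.Str.len h == 1
    · have hp' : h.length = 1 := pv_len_eq h hp
      simp only [List.filter_cons, hp, if_pos trivial, List.foldl_cons,
        PySem.List.remove?_cons_self, Option.getD_some]
      simpa using ih
    · have hp' : ¬ h.length = 1 := pv_len_ne h hp
      have : (h :: t).filter (fun w => PySem.Str.len w == 1)
          = t.filter (fun w => PySem.Str.len w == 1) := by simp [hp']
      rw [this, pv_remAll_skip _ h t (fun b hb => (List.mem_filter.mp hb).2) hp, ih]
      simp [hp']

theorem pv_A_eq_filter (u : List String) :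
    preprocessWords u = u.filter (fun w => !(PySem.Str.len w == 1)) := by
  unfold preprocessWords
  rw [show (List.foldl (fun acc word => if (PySem.Str.len word == 1) = true
        then acc ++ [word] else acc) [] u)
      = [] ++ List.map id (u.filter (fun w => PySem.Str.len w == 1)) from
      PySem.List.foldl_append_if _ id u []]
  rw [List.map_id, List.nil_append]
  exact pv_remAll_filter u

-- the loop invariant of B's compaction pass: after the indices covering A ++ M have been
-- processed, the list is A ++ M ++ R with A the compacted prefix (j = |A|) and M overwritten junk
theorem pv_B_inv (R : List String) : ∀ (A M : List String),
    (let st := (PySem.List.pyRange ((A.length + M.length : Nat) : Int)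
        ((A.length + M.length + R.length : Nat) : Int)).foldl
      (fun (st : List String × Nat) i =>
        match PySem.List.pyGet? st.1 i with
        | some w => if PySem.Str.len w ≠ 1 then (st.1.set st.2 w, st.2 + 1) else st
        | none => st)
      (A ++ M ++ R, A.length)
     st.1.take st.2) = A ++ R.filter (fun w => !(PySem.Str.len w == 1)) := by
  induction R with
  | nil =>
    intro A M
    have hnil : PySem.List.pyRange ((A.length + M.length : Nat) : Int)
        ((A.length + M.length + 0 : Nat) : Int) = [] := by
      simp [PySem.List.pyRange]
    simp only [List.length_nil, hnil, List.foldl_nil, List.append_nil]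
    simp [List.take_left (l₁ := A) (l₂ := M)]
  | cons w R ih =>
    intro A M
    have hlt : ((A.length + M.length : Nat) : Int)
        < ((A.length + M.length + (w :: R).length : Nat) : Int) := by
      simp
    rw [PySem.List.pyRange_one_cons hlt, List.foldl_cons]
    have hget : PySem.List.pyGet? (A ++ M ++ w :: R) ((A.length + M.length : Nat) : Int)
        = some w := by
      rw [PySem.List.pyGet?_natCast]
      rw [show A ++ M ++ w :: R = (A ++ M) ++ w :: R from by simp]
      simp
    simp only [hget]
    by_cases hq : PySem.Str.len w ≠ 1
    · simp only [if_pos hq]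
      -- the write: (A ++ M ++ w :: R).set A.length w
      cases M with
      | nil =>
        have hset : (A ++ [] ++ w :: R).set A.length w = (A ++ [w]) ++ [] ++ R := by
          simp
        have hcast : ((A.length + ([] : List String).length : Nat) : Int) + 1
            = (((A ++ [w]).length + ([] : List String).length : Nat) : Int) := by
          simp
        have hcast2 : ((A.length + ([] : List String).length + (w :: R).length : Nat) : Int)
            = (((A ++ [w]).length + ([] : List String).length + R.length : Nat) : Int) := by
          simp; omega
        rw [hset, hcast, hcast2]
        have := ih (A ++ [w]) []
        simp only [show (A ++ [w]).length = A.length + 1 from by simp] at this ⊢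
        rw [this]
        have hq' : ¬ w.length = 1 := by
          simp [PySem.Str.len_eq] at hq; simpa using hq
        simp [hq']
      | cons m M =>
        have hset : (A ++ m :: M ++ w :: R).set A.length w = (A ++ [w]) ++ (M ++ [w]) ++ R := by
          rw [show A ++ m :: M ++ w :: R = A ++ (m :: (M ++ w :: R)) from by simp,
            List.set_append]
          simp
        have hcast : ((A.length + (m :: M).length : Nat) : Int) + 1
            = (((A ++ [w]).length + (M ++ [w]).length : Nat) : Int) := by
          simp; omega
        have hcast2 : ((A.length + (m :: M).length + (w :: R).length : Nat) : Int)
            = (((A ++ [w]).length + (M ++ [w]).length + R.length : Nat) : Int) := by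
          simp; omega
        rw [hset, hcast, hcast2]
        have := ih (A ++ [w]) (M ++ [w])
        simp only [show (A ++ [w]).length = A.length + 1 from by simp] at this ⊢
        rw [this]
        have hq' : ¬ w.length = 1 := by
          simp [PySem.Str.len_eq] at hq; simpa using hq
        simp [hq']
    · simp only [if_neg hq]
      have hcast : ((A.length + M.length : Nat) : Int) + 1
          = ((A.length + (M ++ [w]).length : Nat) : Int) := by
        simp; omega
      have hcast2 : ((A.length + M.length + (w :: R).length : Nat) : Int)
          = ((A.length + (M ++ [w]).length + R.length : Nat) : Int) := by
        simp; omega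
      have hre : A ++ M ++ w :: R = A ++ (M ++ [w]) ++ R := by simp
      rw [hcast, hcast2, hre, ih A (M ++ [w])]
      have hq' : w.length = 1 := by
        have h2 := Decidable.not_not.mp hq
        simp [PySem.Str.len_eq] at h2; simpa using h2
      simp [hq']

theorem pv_B_eq_filter (u : List String) :
    preprocessWords_alt u = u.filter (fun w => !(PySem.Str.len w == 1)) := by
  have := pv_B_inv u [] []
  simpa [preprocessWords_alt] using this

-- ===== VERDICT (by name: the statement is the Claim_ definition above) =====
theorem preprocessWords_spec : Claim_equal_preprocessWords := by
  intro u _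
  unfold Spec_preprocessWords
  rw [pv_A_eq_filter, pv_B_eq_filter]
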